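-- pv_equiv track=rewrite | github.com/patrickt6/pmle-summer | gcp-pmle-quiz/pages/2_☁️_GCP_Products.py | extract_ui_tags
-- ===== SOURCE A (Python) =====
-- def extract_ui_tags(ui_list):
--     # lightweight tagging so users can filter
--     tags = set()
--     for ui in ui_list:
--         u = ui.lower()
--         if "console" in u or "web ui" in u:
--             tags.add("Console / Web UI")
--         if "python" in u or "sdk" in u or "client" in u:
--             tags.add("SDK / Client Libraries")
--         if "cli" in u or "gcloud" in u or "bq tool" in u:
--             tags.add("CLI")
--         if "rest" in u or "api" in u:
--             tags.add("API")
--         if "sql" in u: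
--             tags.add("SQL")
--     return sorted(tags)
-- ===== SOURCE B (Python) =====
-- _TAGS = [
--     ("API", ("rest", "api")),
--     ("CLI", ("cli", "gcloud", "bq tool")),
--     ("Console / Web UI", ("console", "web ui")),
--     ("SDK / Client Libraries", ("python", "sdk", "client")),
--     ("SQL", ("sql",)),
-- ]
--
--
-- def extract_ui_tags(ui_list):
--     # table-driven: tags listed in sorted order, so no set/sorted needed
--     lowered = [ui.lower() for ui in ui_list]
--     return [tag for tag, kws in _TAGS
--             if any(kw in u for u in lowered for kw in kws)]
-- ===== Notes on version B (the rewrite author's own statement) =====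
-- stated objective: idiomatic
-- what changed: Replaces the per-string chain of if-branches plus set-then-sort with a keyword table listed in sorted tag order: the outer loop is over tags, each tag is emitted once if any (pre-lowered) string contains any of its keywords, so the set and the final sort disappear.
import Mathlib
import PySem

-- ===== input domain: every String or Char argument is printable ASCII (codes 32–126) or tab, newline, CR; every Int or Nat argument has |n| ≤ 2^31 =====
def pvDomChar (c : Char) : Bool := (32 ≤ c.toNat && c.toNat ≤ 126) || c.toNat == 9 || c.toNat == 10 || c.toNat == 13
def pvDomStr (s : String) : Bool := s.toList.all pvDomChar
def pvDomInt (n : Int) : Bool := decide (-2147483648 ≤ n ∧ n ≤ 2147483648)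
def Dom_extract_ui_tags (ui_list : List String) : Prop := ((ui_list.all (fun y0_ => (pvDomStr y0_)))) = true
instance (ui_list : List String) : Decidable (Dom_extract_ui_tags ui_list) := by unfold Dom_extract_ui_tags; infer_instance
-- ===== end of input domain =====

-- B replaces A's per-string if-chain + set + final sort by a keyword table kept in sorted
-- tag order, emitting each tag once if any lowered string contains one of its keywords (idiomatic).

-- ===== PORT A =====
def pvStepA (tags : PySem.Set String) (ui : String) : PySem.Set String :=
  let u := PySem.Str.lower ui
  let tags := if PySem.Str.isIn "console" u || PySem.Str.isIn "web ui" u then PySem.Set.add tags "Console / Web UI" else tags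
  let tags := if PySem.Str.isIn "python" u || PySem.Str.isIn "sdk" u || PySem.Str.isIn "client" u then PySem.Set.add tags "SDK / Client Libraries" else tags
  let tags := if PySem.Str.isIn "cli" u || PySem.Str.isIn "gcloud" u || PySem.Str.isIn "bq tool" u then PySem.Set.add tags "CLI" else tags
  let tags := if PySem.Str.isIn "rest" u || PySem.Str.isIn "api" u then PySem.Set.add tags "API" else tags
  let tags := if PySem.Str.isIn "sql" u then PySem.Set.add tags "SQL" else tags
  tags

def extract_ui_tags (ui_list : List String) : List String :=
  let tags : PySem.Set String := ui_list.foldl pvStepA PySem.Set.empty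
  PySem.List.sorted tags (fun x => x) false

-- ===== PORT B =====
def pvTagTable : List (String × List String) :=
  [("API", ["rest", "api"]),
   ("CLI", ["cli", "gcloud", "bq tool"]),
   ("Console / Web UI", ["console", "web ui"]),
   ("SDK / Client Libraries", ["python", "sdk", "client"]),
   ("SQL", ["sql"])]

def extract_ui_tags_alt (ui_list : List String) : List String :=
  let lowered := ui_list.map PySem.Str.lower
  (pvTagTable.filter
      (fun p => lowered.any (fun u => p.2.any (fun kw => PySem.Str.isIn kw u)))).map (fun p => p.1)

-- ===== PRECONDITION & SPEC =====
def Spec_extract_ui_tags (ui_list : List String) (out : List String) : Prop := out = extract_ui_tags_alt ui_list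
instance (ui_list : List String) (out : List String) : Decidable (Spec_extract_ui_tags ui_list out) := by unfold Spec_extract_ui_tags; infer_instance

-- ===== CLAIM (what is proved, stated in full; the proofs are below) =====
def Claim_equal_extract_ui_tags : Prop := ∀ (ui_list : List String), Dom_extract_ui_tags ui_list → Spec_extract_ui_tags ui_list (extract_ui_tags ui_list)

-- ===== LEMMAS AND PROOFS =====

set_option maxHeartbeats 1600000

-- does string ui (lowercased) contain one of the keywords kws?
def pvHit (kws : List String) (ui : String) : Bool :=
  kws.any (fun kw => PySem.Str.isIn kw (PySem.Str.lower ui))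

-- does some string of l trigger keyword group kws?
def pvTrig (kws : List String) (l : List String) : Prop :=
  (l.any (fun ui => pvHit kws ui)) = true

theorem pv_mem_iteAdd {c : Prop} [Decidable c] (s : PySem.Set String) (t x : String) :
    x ∈ (if c then PySem.Set.add s t else s) ↔ x ∈ s ∨ (c ∧ x = t) := by
  split_ifs with h <;> simp [PySem.Set.mem_add, h]

theorem pv_nodup_iteAdd {c : Prop} [Decidable c] (s : PySem.Set String) (t : String)
    (h : s.Nodup) : (if c then PySem.Set.add s t else s).Nodup := by
  split_ifs
  · exact PySem.Set.nodup_add _ _ h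
  · exact h

theorem pv_mem_stepA (x : String) (acc : PySem.Set String) (ui : String) :
    x ∈ pvStepA acc ui ↔ x ∈ acc ∨
      (pvHit ["console", "web ui"] ui = true ∧ x = "Console / Web UI") ∨
      (pvHit ["python", "sdk", "client"] ui = true ∧ x = "SDK / Client Libraries") ∨
      (pvHit ["cli", "gcloud", "bq tool"] ui = true ∧ x = "CLI") ∨
      (pvHit ["rest", "api"] ui = true ∧ x = "API") ∨
      (pvHit ["sql"] ui = true ∧ x = "SQL") := by
  simp only [pvStepA, pv_mem_iteAdd, pvHit, List.any_cons, List.any_nil, Bool.or_false,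
    Bool.or_assoc, or_assoc]

theorem pv_nodup_stepA (acc : PySem.Set String) (ui : String) (h : acc.Nodup) :
    (pvStepA acc ui).Nodup := by
  simp only [pvStepA]
  exact pv_nodup_iteAdd _ _ (pv_nodup_iteAdd _ _ (pv_nodup_iteAdd _ _
    (pv_nodup_iteAdd _ _ (pv_nodup_iteAdd _ _ h))))

theorem pv_mem_foldA (l : List String) (acc : PySem.Set String) (x : String) :
    x ∈ l.foldl pvStepA acc ↔ x ∈ acc ∨
      (pvTrig ["console", "web ui"] l ∧ x = "Console / Web UI") ∨
      (pvTrig ["python", "sdk", "client"] l ∧ x = "SDK / Client Libraries") ∨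
      (pvTrig ["cli", "gcloud", "bq tool"] l ∧ x = "CLI") ∨
      (pvTrig ["rest", "api"] l ∧ x = "API") ∨
      (pvTrig ["sql"] l ∧ x = "SQL") := by
  induction l generalizing acc with
  | nil => simp [pvTrig]
  | cons ui t ih =>
      simp only [List.foldl_cons, ih, pv_mem_stepA, pvTrig, List.any_cons, Bool.or_eq_true]
      constructor
      · rintro ((h | ⟨h, rfl⟩ | ⟨h, rfl⟩ | ⟨h, rfl⟩ | ⟨h, rfl⟩ | ⟨h, rfl⟩) |
                ⟨h, rfl⟩ | ⟨h, rfl⟩ | ⟨h, rfl⟩ | ⟨h, rfl⟩ | ⟨h, rfl⟩)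
        · exact Or.inl h
        · exact Or.inr (Or.inl ⟨Or.inl h, rfl⟩)
        · exact Or.inr (Or.inr (Or.inl ⟨Or.inl h, rfl⟩))
        · exact Or.inr (Or.inr (Or.inr (Or.inl ⟨Or.inl h, rfl⟩)))
        · exact Or.inr (Or.inr (Or.inr (Or.inr (Or.inl ⟨Or.inl h, rfl⟩))))
        · exact Or.inr (Or.inr (Or.inr (Or.inr (Or.inr ⟨Or.inl h, rfl⟩))))
        · exact Or.inr (Or.inl ⟨Or.inr h, rfl⟩)
        · exact Or.inr (Or.inr (Or.inl ⟨Or.inr h, rfl⟩))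
        · exact Or.inr (Or.inr (Or.inr (Or.inl ⟨Or.inr h, rfl⟩)))
        · exact Or.inr (Or.inr (Or.inr (Or.inr (Or.inl ⟨Or.inr h, rfl⟩))))
        · exact Or.inr (Or.inr (Or.inr (Or.inr (Or.inr ⟨Or.inr h, rfl⟩))))
      · rintro (h | ⟨h | h, rfl⟩ | ⟨h | h, rfl⟩ | ⟨h | h, rfl⟩ | ⟨h | h, rfl⟩ | ⟨h | h, rfl⟩)
        · exact Or.inl (Or.inl h)
        · exact Or.inl (Or.inr (Or.inl ⟨h, rfl⟩))
        · exact Or.inr (Or.inl ⟨h, rfl⟩)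
        · exact Or.inl (Or.inr (Or.inr (Or.inl ⟨h, rfl⟩)))
        · exact Or.inr (Or.inr (Or.inl ⟨h, rfl⟩))
        · exact Or.inl (Or.inr (Or.inr (Or.inr (Or.inl ⟨h, rfl⟩))))
        · exact Or.inr (Or.inr (Or.inr (Or.inl ⟨h, rfl⟩)))
        · exact Or.inl (Or.inr (Or.inr (Or.inr (Or.inr (Or.inl ⟨h, rfl⟩)))))
        · exact Or.inr (Or.inr (Or.inr (Or.inr (Or.inl ⟨h, rfl⟩))))
        · exact Or.inl (Or.inr (Or.inr (Or.inr (Or.inr (Or.inr ⟨h, rfl⟩)))))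
        · exact Or.inr (Or.inr (Or.inr (Or.inr (Or.inr ⟨h, rfl⟩))))

theorem pv_nodup_foldA (l : List String) (acc : PySem.Set String) (h : acc.Nodup) :
    (l.foldl pvStepA acc).Nodup := by
  induction l generalizing acc with
  | nil => exact h
  | cons ui t ih => exact ih _ (pv_nodup_stepA _ _ h)

theorem pv_mem_alt (l : List String) (x : String) :
    x ∈ extract_ui_tags_alt l ↔
      (pvTrig ["rest", "api"] l ∧ x = "API") ∨
      (pvTrig ["cli", "gcloud", "bq tool"] l ∧ x = "CLI") ∨
      (pvTrig ["console", "web ui"] l ∧ x = "Console / Web UI") ∨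
      (pvTrig ["python", "sdk", "client"] l ∧ x = "SDK / Client Libraries") ∨
      (pvTrig ["sql"] l ∧ x = "SQL") := by
  simp only [extract_ui_tags_alt, List.mem_map, List.mem_filter]
  constructor
  · rintro ⟨p, ⟨hp, hc⟩, rfl⟩
    simp only [pvTagTable, List.mem_cons, List.not_mem_nil, or_false] at hp
    rcases hp with rfl | rfl | rfl | rfl | rfl <;>
      [exact Or.inl ⟨by simpa only [pvTrig, pvHit, List.any_map, Function.comp_def] using hc, rfl⟩;
       exact Or.inr (Or.inl ⟨by simpa only [pvTrig, pvHit, List.any_map, Function.comp_def] using hc, rfl⟩);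
       exact Or.inr (Or.inr (Or.inl ⟨by simpa only [pvTrig, pvHit, List.any_map, Function.comp_def] using hc, rfl⟩));
       exact Or.inr (Or.inr (Or.inr (Or.inl ⟨by simpa only [pvTrig, pvHit, List.any_map, Function.comp_def] using hc, rfl⟩)));
       exact Or.inr (Or.inr (Or.inr (Or.inr ⟨by simpa only [pvTrig, pvHit, List.any_map, Function.comp_def] using hc, rfl⟩)))]
  · rintro (⟨hc, rfl⟩ | ⟨hc, rfl⟩ | ⟨hc, rfl⟩ | ⟨hc, rfl⟩ | ⟨hc, rfl⟩) <;>
      [exact ⟨("API", ["rest", "api"]), ⟨by simp [pvTagTable],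
         by simpa only [pvTrig, pvHit, List.any_map, Function.comp_def] using hc⟩, rfl⟩;
       exact ⟨("CLI", ["cli", "gcloud", "bq tool"]), ⟨by simp [pvTagTable],
         by simpa only [pvTrig, pvHit, List.any_map, Function.comp_def] using hc⟩, rfl⟩;
       exact ⟨("Console / Web UI", ["console", "web ui"]), ⟨by simp [pvTagTable],
         by simpa only [pvTrig, pvHit, List.any_map, Function.comp_def] using hc⟩, rfl⟩;
       exact ⟨("SDK / Client Libraries", ["python", "sdk", "client"]), ⟨by simp [pvTagTable],
         by simpa only [pvTrig, pvHit, List.any_map, Function.comp_def] using hc⟩, rfl⟩;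
       exact ⟨("SQL", ["sql"]), ⟨by simp [pvTagTable],
         by simpa only [pvTrig, pvHit, List.any_map, Function.comp_def] using hc⟩, rfl⟩]

theorem pv_alt_pairwise (l : List String) :
    (extract_ui_tags_alt l).Pairwise (· < ·) := by
  have hs : List.Sublist (extract_ui_tags_alt l) (pvTagTable.map (fun p => p.1)) :=
    List.Sublist.map (fun p : String × List String => p.1) List.filter_sublist
  have hlt : ∀ a b : String, a.toList < b.toList → a < b :=
    fun a b h => String.lt_iff_toList_lt.mpr h
  have hp : (pvTagTable.map (fun p => p.1)).Pairwise (· < ·) := by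
    simp only [pvTagTable, List.map_cons, List.map_nil, List.pairwise_cons, List.mem_cons,
      List.not_mem_nil, or_false]
    refine ⟨?_, ?_, ?_, ?_, fun a' h => h.elim, List.Pairwise.nil⟩
    · rintro b (rfl | rfl | rfl | rfl) <;> exact hlt _ _ (by decide)
    · rintro b (rfl | rfl | rfl) <;> exact hlt _ _ (by decide)
    · rintro b (rfl | rfl) <;> exact hlt _ _ (by decide)
    · rintro b rfl; exact hlt _ _ (by decide)
  exact hp.sublist hs

theorem pv_nodup_alt (l : List String) : (extract_ui_tags_alt l).Nodup :=
  (pv_alt_pairwise l).imp (fun h => ne_of_lt h)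

-- ===== VERDICT (by name: the statement is the Claim_ definition above) =====
theorem extract_ui_tags_spec : Claim_equal_extract_ui_tags := by
  intro l _
  show extract_ui_tags l = extract_ui_tags_alt l
  unfold extract_ui_tags
  apply PySem.List.sorted_eq_of_perm_of_pairwise_lt
  · refine (List.perm_ext_iff_of_nodup (pv_nodup_alt l) ?_).mpr ?_
    · exact pv_nodup_foldA l _ List.nodup_nil
    · intro x
      rw [pv_mem_alt, pv_mem_foldA]
      simp only [PySem.Set.empty, List.not_mem_nil, false_or]
      constructor
      · rintro (h | h | h | h | h)
        · exact Or.inr (Or.inr (Or.inr (Or.inl h)))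
        · exact Or.inr (Or.inr (Or.inl h))
        · exact Or.inl h
        · exact Or.inr (Or.inl h)
        · exact Or.inr (Or.inr (Or.inr (Or.inr h)))
      · rintro (h | h | h | h | h)
        · exact Or.inr (Or.inr (Or.inl h))
        · exact Or.inr (Or.inr (Or.inr (Or.inl h)))
        · exact Or.inr (Or.inl h)
        · exact Or.inl h
        · exact Or.inr (Or.inr (Or.inr (Or.inr h)))
  · exact pv_alt_pairwise l
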